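-- pv_equiv track=rewrite | github.com/mayurjawalkar10/Big_Data_Analytics | HW02/HW02_Jawalkar_Mayur_Mentor.py | get_left_right_class_counts
-- ===== SOURCE A (Python) =====
-- def get_left_right_class_counts(data, class_label, threshold):
--     """
--     This function iterates over the input data and splits the data at a given threshold.
--
--     It calculates the total number of records belonging to each class in each of the left
--     and right region.
--
--     :param data: Input data to split based on a given threshold.
--     :param class_label: list of class labels associated with the data input.
--     :param threshold: value based on which data is to split.
--     :return l_assam: total data points on the left of the threshold having class label assam.
--     :return l_bhutan: total data points on the left of the threshold having class label bhutan.
--     :return r_assam: total data points on the right of the threshold having class label assam.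
--     :return r_bhutan: total data points on the right of the threshold having class label bhutan.
--     """
--     l_assam = l_bhutan = r_assam = r_bhutan = 0
--     for rec_ind in range(len(data)):
--         if data[rec_ind] <= threshold and class_label[rec_ind] == "+1":
--             l_bhutan += 1
--         elif data[rec_ind] <= threshold and class_label[rec_ind] == "-1":
--             l_assam += 1
--         elif data[rec_ind] > threshold and class_label[rec_ind] == "+1":
--             r_bhutan += 1
--         elif data[rec_ind] > threshold and class_label[rec_ind] == "-1":
--             r_assam += 1
--     return l_assam, l_bhutan, r_assam, r_bhutan
-- ===== SOURCE B (Python) =====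
-- def get_left_right_class_counts(data, class_label, threshold):
--     idx = range(len(data))
--     left = [class_label[i] for i in idx if data[i] <= threshold]
--     right = [class_label[i] for i in idx if data[i] > threshold]
--     return (left.count("-1"), left.count("+1"),
--             right.count("-1"), right.count("+1"))
-- ===== Notes on version B (the rewrite author's own statement) =====
-- stated objective: simpler
-- what changed: Replaces the single four-way branching loop by a partition-then-count decomposition: two index comprehensions split the labels into a left and a right list, and the four results are plain list.count calls.
import Mathlib
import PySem

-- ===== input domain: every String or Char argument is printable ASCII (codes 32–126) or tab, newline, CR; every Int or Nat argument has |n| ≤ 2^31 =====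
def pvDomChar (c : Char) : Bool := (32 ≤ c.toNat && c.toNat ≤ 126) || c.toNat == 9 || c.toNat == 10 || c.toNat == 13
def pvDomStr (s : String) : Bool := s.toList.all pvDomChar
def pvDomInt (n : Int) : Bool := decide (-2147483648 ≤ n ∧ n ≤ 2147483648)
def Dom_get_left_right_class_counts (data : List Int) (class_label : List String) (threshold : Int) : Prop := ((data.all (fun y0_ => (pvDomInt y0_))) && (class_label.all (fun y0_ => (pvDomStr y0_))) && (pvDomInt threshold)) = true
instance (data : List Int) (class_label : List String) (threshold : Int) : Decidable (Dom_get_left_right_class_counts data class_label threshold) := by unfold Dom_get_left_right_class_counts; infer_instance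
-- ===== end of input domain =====

-- B replaces A's four-way branching loop by a partition-then-count decomposition (simpler, same cost).

-- ===== PORT A =====
-- one pass over range(len(data)); class_label[rec_ind] is read on every iteration (IndexError excluded by Pre_)
def get_left_right_class_counts (data : List Int) (class_label : List String) (threshold : Int) : Int × Int × Int × Int :=
  let r := (PySem.List.pyRange 0 data.length 1).foldl
    (fun (s : Int × Int × Int × Int) i =>
      let d := PySem.List.pyGetD data i 0
      let c := PySem.List.pyGetD class_label i ""
      if d ≤ threshold ∧ c = "+1" then (s.1, s.2.1 + 1, s.2.2.1, s.2.2.2)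
      else if d ≤ threshold ∧ c = "-1" then (s.1 + 1, s.2.1, s.2.2.1, s.2.2.2)
      else if d > threshold ∧ c = "+1" then (s.1, s.2.1, s.2.2.1, s.2.2.2 + 1)
      else if d > threshold ∧ c = "-1" then (s.1, s.2.1, s.2.2.1 + 1, s.2.2.2)
      else s)
    (0, 0, 0, 0)
  r

-- ===== PORT B =====
-- partition the indices into left/right label lists, then count each label
def get_left_right_class_counts_alt (data : List Int) (class_label : List String) (threshold : Int) : Int × Int × Int × Int :=
  let idx := PySem.List.pyRange 0 data.length 1
  let left := (idx.filter (fun i => decide (PySem.List.pyGetD data i 0 ≤ threshold))).map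
      (fun i => PySem.List.pyGetD class_label i "")
  let right := (idx.filter (fun i => decide (threshold < PySem.List.pyGetD data i 0))).map
      (fun i => PySem.List.pyGetD class_label i "")
  ((left.count "-1" : Int), (left.count "+1" : Int), (right.count "-1" : Int), (right.count "+1" : Int))

-- ===== PRECONDITION & SPEC =====
-- Pre_ excludes only inputs where A raises IndexError (class_label shorter than data); B raises there too.
def Pre_get_left_right_class_counts (data : List Int) (class_label : List String) (threshold : Int) : Prop :=
  data.length ≤ class_label.length
instance (data : List Int) (class_label : List String) (threshold : Int) : Decidable (Pre_get_left_right_class_counts data class_label threshold) := by unfold Pre_get_left_right_class_counts; infer_instance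

def pvWitness_get_left_right_class_counts : List Int × List String × Int := ([1, 3, 5], ["+1", "-1", "+1"], 3)

def Spec_get_left_right_class_counts (data : List Int) (class_label : List String) (threshold : Int) (out : Int × Int × Int × Int) : Prop := out = get_left_right_class_counts_alt data class_label threshold
instance (data : List Int) (class_label : List String) (threshold : Int) (out : Int × Int × Int × Int) : Decidable (Spec_get_left_right_class_counts data class_label threshold out) := by unfold Spec_get_left_right_class_counts; infer_instance

-- ===== CLAIM (what is proved, stated in full; the proofs are below) =====
def Claim_equal_get_left_right_class_counts : Prop := ∀ (data : List Int) (class_label : List String) (threshold : Int), Dom_get_left_right_class_counts data class_label threshold → Pre_get_left_right_class_counts data class_label threshold → Spec_get_left_right_class_counts data class_label threshold (get_left_right_class_counts data class_label threshold)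

-- ===== LEMMAS AND PROOFS =====

-- loop invariant: A's fold over any index list adds exactly B's four partition counts
theorem glrcc_fold_eq (data : List Int) (class_label : List String) (threshold : Int)
    (idxs : List Int) (la lb ra rb : Int) :
    idxs.foldl
      (fun (s : Int × Int × Int × Int) i =>
        let d := PySem.List.pyGetD data i 0
        let c := PySem.List.pyGetD class_label i ""
        if d ≤ threshold ∧ c = "+1" then (s.1, s.2.1 + 1, s.2.2.1, s.2.2.2)
        else if d ≤ threshold ∧ c = "-1" then (s.1 + 1, s.2.1, s.2.2.1, s.2.2.2)
        else if d > threshold ∧ c = "+1" then (s.1, s.2.1, s.2.2.1, s.2.2.2 + 1)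
        else if d > threshold ∧ c = "-1" then (s.1, s.2.1, s.2.2.1 + 1, s.2.2.2)
        else s)
      (la, lb, ra, rb)
    = (la + (((idxs.filter (fun i => decide (PySem.List.pyGetD data i 0 ≤ threshold))).map
              (fun i => PySem.List.pyGetD class_label i "")).count "-1" : Int),
       lb + (((idxs.filter (fun i => decide (PySem.List.pyGetD data i 0 ≤ threshold))).map
              (fun i => PySem.List.pyGetD class_label i "")).count "+1" : Int),
       ra + (((idxs.filter (fun i => decide (threshold < PySem.List.pyGetD data i 0))).map
              (fun i => PySem.List.pyGetD class_label i "")).count "-1" : Int),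
       rb + (((idxs.filter (fun i => decide (threshold < PySem.List.pyGetD data i 0))).map
              (fun i => PySem.List.pyGetD class_label i "")).count "+1" : Int)) := by
  induction idxs generalizing la lb ra rb with
  | nil => simp
  | cons i rest ih =>
    simp only [List.foldl_cons, List.filter_cons]
    by_cases hle : PySem.List.pyGetD data i 0 ≤ threshold
    · have hgt : ¬ PySem.List.pyGetD data i 0 > threshold := by omega
      by_cases hp : PySem.List.pyGetD class_label i "" = "+1"
      · simp [hle, hgt, hp, ih, Prod.ext_iff]
        try ring
      · by_cases hm : PySem.List.pyGetD class_label i "" = "-1"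
        · simp [hle, hgt, hm, ih, Prod.ext_iff]
          try ring
        · simp [hle, hgt, hp, hm, ih]
    · have hgt : PySem.List.pyGetD data i 0 > threshold := by omega
      by_cases hp : PySem.List.pyGetD class_label i "" = "+1"
      · simp [hle, hgt, hp, ih, Prod.ext_iff]
        try ring
      · by_cases hm : PySem.List.pyGetD class_label i "" = "-1"
        · simp [hle, hgt, hm, ih, Prod.ext_iff]
          try ring
        · simp [hle, hgt, hp, hm, ih]

-- ===== VERDICT (by name: the statement is the Claim_ definition above) =====
theorem get_left_right_class_counts_spec : Claim_equal_get_left_right_class_counts := by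
  intro data class_label threshold _ _
  unfold Spec_get_left_right_class_counts get_left_right_class_counts get_left_right_class_counts_alt
  simp only [glrcc_fold_eq, zero_add]
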